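-- pv_equiv track=rewrite | github.com/bssrdf/pyleet | PartitionArrayIntoTwoArraystoMinimizeSumDifference.py | minimumDifference2
-- ===== SOURCE A (Python) =====
-- from typing import List
-- from itertools import combinations
--
-- def minimumDifference2(nums: List[int]) -> int:
--     # Brute force, TLE
--     sm = sum(nums)
--     ans = float('inf')
--     for a in combinations(nums, len(nums)//2):
--         t = 0
--         for i in a:
--             t += i
--         ans = min(ans, abs(t - (sm-t)))
--     return ans
-- ===== SOURCE B (Python) =====
-- from typing import List
--
-- def minimumDifference2(nums: List[int]) -> int:
--     # DP over (count, subset-sum) reachable pairs instead of enumerating all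
--     # C(n, n//2) combinations: sums[k] holds every sum achievable by picking
--     # exactly k elements among those processed so far.
--     half = len(nums) // 2
--     sm = sum(nums)
--     sums = [set() for _ in range(half + 1)]
--     sums[0].add(0)
--     for x in nums:
--         for k in range(half, 0, -1):
--             sums[k] |= {s + x for s in sums[k - 1]}
--     return min(abs(2 * s - sm) for s in sums[half])
-- ===== Notes on version B (the rewrite author's own statement) =====
-- stated objective: alternative
-- what changed: Replaces brute-force enumeration of all C(n,n/2) combinations with a dynamic program that maintains, for each count k, the set of subset sums reachable with exactly k elements, then minimizes |2s-sum| over the k=n/2 set; cost depends on the number of DISTINCT (count,sum) pairs instead of the number of combinations, collapsing on duplicate-heavy inputs.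
import Mathlib
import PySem

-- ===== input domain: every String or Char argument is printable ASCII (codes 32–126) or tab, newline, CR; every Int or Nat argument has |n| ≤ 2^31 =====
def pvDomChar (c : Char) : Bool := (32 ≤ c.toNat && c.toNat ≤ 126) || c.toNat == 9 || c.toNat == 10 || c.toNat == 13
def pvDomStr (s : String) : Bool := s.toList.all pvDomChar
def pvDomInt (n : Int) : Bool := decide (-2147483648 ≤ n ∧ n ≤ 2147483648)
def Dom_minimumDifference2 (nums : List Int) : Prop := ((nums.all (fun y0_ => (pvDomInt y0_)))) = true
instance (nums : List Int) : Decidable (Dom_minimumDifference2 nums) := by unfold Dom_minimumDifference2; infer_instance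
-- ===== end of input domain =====

-- B replaces brute-force enumeration of all C(n,n/2) combinations by a DP that keeps,
-- for each count k, the set of subset sums reachable with exactly k elements (objective: alternative algorithm).

-- ===== PORT A =====
-- itertools.combinations(nums, k), in Python's order (tuples kept as lists)
def pvComb : List Int → Nat → List (List Int)
  | _, 0 => [[]]
  | [], _ + 1 => []
  | x :: xs, k + 1 => (pvComb xs k).map (fun c => x :: c) ++ pvComb xs (k + 1)

-- ans = float('inf') is modelled as `none`; it is replaced by an Int at the first
-- combination, and combinations(nums, len(nums)//2) is never empty, so the final
-- `match` never takes the `none` branch (len(nums)//2 on a Nat length is Python's //).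
def minimumDifference2 (nums : List Int) : Int :=
  let sm := nums.sum
  let ans : Option Int :=
    (pvComb nums (nums.length / 2)).foldl
      (fun ans a =>
        let t := a.foldl (fun t i => t + i) 0
        some (match ans with
              | none => |t - (sm - t)|
              | some m => min m |t - (sm - t)|)) none
  match ans with
  | some m => m
  | none => 0

-- ===== PORT B =====
-- one pass of `for k in range(half, 0, -1): sums[k] |= {s + x for s in sums[k-1]}`:
-- every level k ≥ 1 is updated from the PRE-iteration level k-1 (that is exactly what
-- the downward in-place loop computes), level 0 is unchanged.
def pvStepTail (x : Int) : PySem.Set Int → List (PySem.Set Int) → List (PySem.Set Int)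
  | _, [] => []
  | prev, s :: rest => PySem.Set.update s (prev.map (fun v => v + x)) :: pvStepTail x s rest

def pvStep (x : Int) : List (PySem.Set Int) → List (PySem.Set Int)
  | [] => []
  | s0 :: rest => s0 :: pvStepTail x s0 rest

-- min over the values abs(2*s - sm) for s in sums[half]: the set is nonempty, so the
-- final `match` never takes the `none` branch (min of values is iteration-order независ.)
def minimumDifference2_alt (nums : List Int) : Int :=
  let half := nums.length / 2
  let sm := nums.sum
  let init : List (PySem.Set Int) := PySem.Set.add PySem.Set.empty 0 :: List.replicate half PySem.Set.empty
  let sums := nums.foldl (fun st x => pvStep x st) init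
  match ((PySem.List.pyGetD sums (half : Int) PySem.Set.empty).map (fun s => |2 * s - sm|)).min? with
  | some m => m
  | none => 0

-- ===== PRECONDITION & SPEC =====
def Spec_minimumDifference2 (nums : List Int) (out : Int) : Prop := out = minimumDifference2_alt nums
instance (nums : List Int) (out : Int) : Decidable (Spec_minimumDifference2 nums out) := by unfold Spec_minimumDifference2; infer_instance

-- ===== CLAIM (what is proved, stated in full; the proofs are below) =====
def Claim_equal_minimumDifference2 : Prop := ∀ (nums : List Int), Dom_minimumDifference2 nums → Spec_minimumDifference2 nums (minimumDifference2 nums)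

-- ===== LEMMAS AND PROOFS =====

-- membership in A's combination list = sublist of the given length
theorem mem_pvComb (xs : List Int) (k : Nat) (c : List Int) :
    c ∈ pvComb xs k ↔ c.Sublist xs ∧ c.length = k := by
  induction xs generalizing k c with
  | nil =>
    cases k with
    | zero => simp [pvComb, List.length_eq_zero_iff]
    | succ k =>
      simp only [pvComb, List.not_mem_nil, false_iff, not_and]
      intro hs
      simp [List.sublist_nil.mp hs]
  | cons x xs ih =>
    cases k with
    | zero =>
      simp only [pvComb, List.mem_singleton]
      constructor
      · rintro rfl; exact ⟨List.nil_sublist _, rfl⟩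
      · rintro ⟨-, h⟩; exact List.length_eq_zero_iff.mp h
    | succ k =>
      simp only [pvComb, List.mem_append, List.mem_map, ih, List.sublist_cons_iff]
      constructor
      · rintro (⟨c', ⟨hs, hl⟩, rfl⟩ | ⟨hs, hl⟩)
        · exact ⟨Or.inr ⟨c', rfl, hs⟩, by simp [hl]⟩
        · exact ⟨Or.inl hs, hl⟩
      · rintro ⟨hs | ⟨r, rfl, hr⟩, hl⟩
        · exact Or.inr ⟨hs, hl⟩
        · exact Or.inl ⟨r, ⟨hr, by simpa using hl⟩, rfl⟩

-- invariant: level (i + position) of the DP state holds exactly the sums of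
-- sublists of the processed prefix p of that length
def pvInvAt (p : List Int) (i : Nat) (s : PySem.Set Int) : Prop :=
  ∀ v, v ∈ s ↔ ∃ c : List Int, c.Sublist p ∧ c.length = i ∧ c.sum = v

def pvInv (p : List Int) : Nat → List (PySem.Set Int) → Prop
  | _, [] => True
  | i, s :: rest => pvInvAt p i s ∧ pvInv p (i + 1) rest

theorem sublist_append_single (p : List Int) (x : Int) (c : List Int) :
    c.Sublist (p ++ [x]) ↔ c.Sublist p ∨ ∃ c', c = c' ++ [x] ∧ c'.Sublist p := by
  rw [List.sublist_append_iff]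
  constructor
  · rintro ⟨l₁, l₂, rfl, h₁, h₂⟩
    rcases List.sublist_singleton.mp h₂ with rfl | rfl
    · exact Or.inl (by simpa using h₁)
    · exact Or.inr ⟨l₁, rfl, h₁⟩
  · rintro (h | ⟨c', rfl, h⟩)
    · exact ⟨c, [], by simp, h, by simp⟩
    · exact ⟨c', [x], rfl, h, List.Sublist.refl _⟩

theorem pvInvAt_zero (p : List Int) (x : Int) (s : PySem.Set Int)
    (h : pvInvAt p 0 s) : pvInvAt (p ++ [x]) 0 s := by
  intro v
  rw [h v]
  constructor
  · rintro ⟨c, -, hl, hv⟩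
    exact ⟨c, by simp [List.length_eq_zero_iff.mp hl], hl, hv⟩
  · rintro ⟨c, -, hl, hv⟩
    exact ⟨c, by simp [List.length_eq_zero_iff.mp hl], hl, hv⟩

theorem pvInvAt_succ (p : List Int) (x : Int) (i : Nat)
    (prev s : PySem.Set Int) (hp : pvInvAt p i prev) (hs : pvInvAt p (i + 1) s) :
    pvInvAt (p ++ [x]) (i + 1) (PySem.Set.update s (prev.map (fun v => v + x))) := by
  intro v
  rw [PySem.Set.mem_update]
  constructor
  · rintro (hv | hv)
    · obtain ⟨c, hc, hl, hsum⟩ := (hs v).mp hv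
      exact ⟨c, (sublist_append_single p x c).mpr (Or.inl hc), hl, hsum⟩
    · obtain ⟨u, hu, rfl⟩ := List.mem_map.mp hv
      obtain ⟨c, hc, hl, hsum⟩ := (hp u).mp hu
      exact ⟨c ++ [x], (sublist_append_single p x _).mpr (Or.inr ⟨c, rfl, hc⟩),
        by simp [hl], by simp [hsum]⟩
  · rintro ⟨c, hc, hl, hsum⟩
    rcases (sublist_append_single p x c).mp hc with h | ⟨c', rfl, h⟩
    · exact Or.inl ((hs v).mpr ⟨c, h, hl, hsum⟩)
    · refine Or.inr (List.mem_map.mpr ⟨c'.sum, (hp c'.sum).mpr ⟨c', h, by simpa using hl, rfl⟩, ?_⟩)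
      simpa using hsum

theorem pvInv_stepTail (p : List Int) (x : Int) :
    ∀ (rest : List (PySem.Set Int)) (prev : PySem.Set Int) (i : Nat),
      pvInvAt p i prev → pvInv p (i + 1) rest →
      pvInv (p ++ [x]) (i + 1) (pvStepTail x prev rest) := by
  intro rest
  induction rest with
  | nil => intro prev i _ _; trivial
  | cons s r ih =>
    intro prev i hprev ⟨hs, hr⟩
    exact ⟨pvInvAt_succ p x i prev s hprev hs, ih s (i + 1) hs hr⟩

theorem pvInv_step (p : List Int) (x : Int) (st : List (PySem.Set Int))
    (h : pvInv p 0 st) : pvInv (p ++ [x]) 0 (pvStep x st) := by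
  cases st with
  | nil => trivial
  | cons s0 rest =>
    obtain ⟨h0, hr⟩ := h
    exact ⟨pvInvAt_zero p x s0 h0, pvInv_stepTail p x rest s0 0 h0 hr⟩

theorem pvInv_foldl :
    ∀ (l p : List Int) (st : List (PySem.Set Int)), pvInv p 0 st →
      pvInv (p ++ l) 0 (l.foldl (fun st x => pvStep x st) st) := by
  intro l
  induction l with
  | nil => intro p st h; simpa using h
  | cons x l ih =>
    intro p st h
    have := ih (p ++ [x]) (pvStep x st) (pvInv_step p x st h)
    simpa [List.foldl_cons] using this

theorem length_pvStepTail (x : Int) :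
    ∀ (rest : List (PySem.Set Int)) (prev : PySem.Set Int),
      (pvStepTail x prev rest).length = rest.length := by
  intro rest
  induction rest with
  | nil => intro _; rfl
  | cons s r ih => intro prev; simp [pvStepTail, ih s]

theorem length_pvStep (x : Int) (st : List (PySem.Set Int)) :
    (pvStep x st).length = st.length := by
  cases st with
  | nil => rfl
  | cons s0 rest => simp [pvStep, length_pvStepTail x rest s0]

theorem length_foldl_pvStep (l : List Int) :
    ∀ (st : List (PySem.Set Int)),
      (l.foldl (fun st x => pvStep x st) st).length = st.length := by
  induction l with
  | nil => intro st; rfl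
  | cons x l ih => intro st; simpa [List.foldl_cons, length_pvStep] using ih (pvStep x st)

theorem pvInv_get :
    ∀ (st : List (PySem.Set Int)) (p : List Int) (i j : Nat) (h : j < st.length),
      pvInv p i st → pvInvAt p (i + j) st[j] := by
  intro st
  induction st with
  | nil => intro p i j h; simp at h
  | cons s rest ih =>
    intro p i j h ⟨h0, hr⟩
    cases j with
    | zero => simpa using h0
    | succ j =>
      have := ih p (i + 1) j (by simpa using h) hr
      simpa [Nat.add_comm, Nat.add_left_comm] using this

theorem pvInvAt_empty_succ (i : Nat) : pvInvAt [] (i + 1) PySem.Set.empty := by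
  intro v
  simp only [PySem.Set.empty, List.not_mem_nil, false_iff]
  rintro ⟨c, hc, hl, -⟩
  simp [List.sublist_nil.mp hc] at hl

theorem pvInv_replicate : ∀ (n i : Nat), pvInv [] (i + 1) (List.replicate n PySem.Set.empty) := by
  intro n
  induction n with
  | zero => intro i; trivial
  | succ n ih => intro i; exact ⟨pvInvAt_empty_succ i, ih (i + 1)⟩

theorem pvInv_init (half : Nat) :
    pvInv [] 0 (PySem.Set.add PySem.Set.empty 0 :: List.replicate half PySem.Set.empty) := by
  refine ⟨?_, pvInv_replicate half 0⟩
  intro v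
  rw [PySem.Set.mem_add]
  simp only [PySem.Set.empty, List.not_mem_nil, false_or]
  constructor
  · rintro rfl; exact ⟨[], List.Sublist.refl _, rfl, rfl⟩
  · rintro ⟨c, -, hl, hsum⟩
    rw [List.length_eq_zero_iff.mp hl] at hsum
    exact hsum.symm

-- A's fold over combinations computes List.min? of the mapped values
theorem foldl_min_some (f : List Int → Int) :
    ∀ (l : List (List Int)) (m : Int),
      l.foldl (fun ans a => some (match ans with
        | none => f a
        | some m => min m (f a))) (some m) = some ((l.map f).foldl min m) := by
  intro l
  induction l with
  | nil => intro m; rfl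
  | cons a l ih => intro m; simpa using ih (min m (f a))

theorem foldl_min_eq_min? (f : List Int → Int) (l : List (List Int)) :
    l.foldl (fun ans a => some (match ans with
        | none => f a
        | some m => min m (f a))) none = (l.map f).min? := by
  cases l with
  | nil => rfl
  | cons a l =>
    rw [List.map_cons, List.min?_cons', List.foldl_cons]
    exact foldl_min_some f l (f a)

theorem min?_congr (l₁ l₂ : List Int) (hne : l₁ ≠ [])
    (h : ∀ v, v ∈ l₁ ↔ v ∈ l₂) : l₁.min? = l₂.min? := by
  obtain ⟨m, hm⟩ : ∃ m, l₁.min? = some m := by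
    cases l₁ with
    | nil => exact absurd rfl hne
    | cons a l => exact ⟨_, List.min?_cons'⟩
  obtain ⟨hmem, hle⟩ := List.min?_eq_some_iff.mp hm
  rw [hm]
  symm
  exact List.min?_eq_some_iff.mpr ⟨(h m).mp hmem, fun b hb => hle b ((h b).mpr hb)⟩

-- ===== VERDICT (by name: the statement is the Claim_ definition above) =====
theorem minimumDifference2_spec : Claim_equal_minimumDifference2 := by
  intro nums _
  unfold Spec_minimumDifference2
  simp only [minimumDifference2, minimumDifference2_alt]
  rw [foldl_min_eq_min?]
  have hlen : (nums.foldl (fun st x => pvStep x st)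
      (PySem.Set.add PySem.Set.empty 0 :: List.replicate (nums.length / 2) PySem.Set.empty)).length
      = nums.length / 2 + 1 := by
    rw [length_foldl_pvStep]; simp
  have hhalf : nums.length / 2 < (nums.foldl (fun st x => pvStep x st)
      (PySem.Set.add PySem.Set.empty 0 :: List.replicate (nums.length / 2) PySem.Set.empty)).length := by
    omega
  have hidx : PySem.List.pyGetD (nums.foldl (fun st x => pvStep x st)
      (PySem.Set.add PySem.Set.empty 0 :: List.replicate (nums.length / 2) PySem.Set.empty))
      ((nums.length / 2 : Nat) : Int) PySem.Set.empty
      = (nums.foldl (fun st x => pvStep x st)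
      (PySem.Set.add PySem.Set.empty 0 :: List.replicate (nums.length / 2) PySem.Set.empty))[nums.length / 2] := by
    rw [PySem.List.pyGetD_natCast]
    exact List.getD_eq_getElem _ _ hhalf
  rw [hidx]
  have hinv : pvInvAt nums (nums.length / 2)
      (nums.foldl (fun st x => pvStep x st)
      (PySem.Set.add PySem.Set.empty 0 :: List.replicate (nums.length / 2) PySem.Set.empty))[nums.length / 2] := by
    have h0 := pvInv_foldl nums [] _ (pvInv_init (nums.length / 2))
    rw [List.nil_append] at h0
    simpa using pvInv_get _ nums 0 (nums.length / 2) hhalf h0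
  have hmin : ((pvComb nums (nums.length / 2)).map
        (fun a => |a.foldl (fun t i => t + i) 0 - (nums.sum - a.foldl (fun t i => t + i) 0)|)).min?
      = ((nums.foldl (fun st x => pvStep x st)
      (PySem.Set.add PySem.Set.empty 0 :: List.replicate (nums.length / 2) PySem.Set.empty))[nums.length / 2].map
        (fun s => |2 * s - nums.sum|)).min? := by
    apply min?_congr
    · have hmem : nums.take (nums.length / 2) ∈ pvComb nums (nums.length / 2) :=
        (mem_pvComb _ _ _).mpr ⟨List.take_sublist _ _,
          by rw [List.length_take]; omega⟩
      exact List.ne_nil_of_mem (List.mem_map_of_mem hmem)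
    · intro v
      simp only [List.mem_map]
      constructor
      · rintro ⟨a, ha, rfl⟩
        obtain ⟨hs, hl⟩ := (mem_pvComb _ _ _).mp ha
        refine ⟨a.sum, (hinv a.sum).mpr ⟨a, hs, hl, rfl⟩, ?_⟩
        rw [← List.sum_eq_foldl]
        congr 1
        ring
      · rintro ⟨s, hs, rfl⟩
        obtain ⟨c, hc, hl, rfl⟩ := (hinv s).mp hs
        refine ⟨c, (mem_pvComb _ _ _).mpr ⟨hc, hl⟩, ?_⟩
        rw [← List.sum_eq_foldl]
        congr 1
        ring
  rw [hmin]
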